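-- pv_equiv track=rewrite | github.com/SAGE-Lab-UMass/resistance-prediction | utility_files/sequence_translation.py | align_and_handle_deletions
-- ===== SOURCE A (Python) =====
-- def align_and_handle_deletions(translated_seq, ref_seq):
--     """
--     Align translated sequence with the reference sequence, handling mismatches and deletions.
--
--     Args:
--         translated_seq (str): The translated query protein sequence.
--         ref_seq (str): Reference protein sequence.
--
--     Returns:
--         aligned_seq_str (str): Aligned sequence with gaps.
--     """
--     aligned_seq = []
--     ref_index = 0
--     trans_index = 0
--
--     while ref_index < len(ref_seq) and trans_index < len(translated_seq):
--         if translated_seq[trans_index] == ref_seq[ref_index]: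
--             aligned_seq.append(translated_seq[trans_index])
--             trans_index += 1
--         elif translated_seq[trans_index] == '-':
--             aligned_seq.append('-')
--             trans_index += 1
--         elif ref_seq[ref_index] == '-':
--             ref_index += 1
--             continue
--         else:
--             aligned_seq.append(translated_seq[trans_index])
--             trans_index += 1
--         ref_index += 1
--
--     # Trim trailing gaps
--     aligned_seq_str = ''.join(aligned_seq).rstrip('-')
--     return aligned_seq_str
-- ===== SOURCE B (Python) =====
-- def align_and_handle_deletions(translated_seq, ref_seq):
--     """Index-only two-pointer walk: no accumulator list; the aligned string is
--     just the consumed prefix of translated_seq, with trailing gaps stripped."""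
--     i = 0
--     for c in ref_seq:
--         if i >= len(translated_seq):
--             break
--         if not (c == '-' and translated_seq[i] != '-'):
--             i += 1
--     return translated_seq[:i].rstrip('-')
-- ===== Notes on version B (the rewrite author's own statement) =====
-- stated objective: faster
-- what changed: B drops A's four-branch character-appending loop and accumulator list entirely: it only advances an index over translated_seq while iterating the reference (skipping reference gaps), then returns the consumed prefix slice with trailing '-' stripped; no per-character list building makes it measurably faster.
import Mathlib
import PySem

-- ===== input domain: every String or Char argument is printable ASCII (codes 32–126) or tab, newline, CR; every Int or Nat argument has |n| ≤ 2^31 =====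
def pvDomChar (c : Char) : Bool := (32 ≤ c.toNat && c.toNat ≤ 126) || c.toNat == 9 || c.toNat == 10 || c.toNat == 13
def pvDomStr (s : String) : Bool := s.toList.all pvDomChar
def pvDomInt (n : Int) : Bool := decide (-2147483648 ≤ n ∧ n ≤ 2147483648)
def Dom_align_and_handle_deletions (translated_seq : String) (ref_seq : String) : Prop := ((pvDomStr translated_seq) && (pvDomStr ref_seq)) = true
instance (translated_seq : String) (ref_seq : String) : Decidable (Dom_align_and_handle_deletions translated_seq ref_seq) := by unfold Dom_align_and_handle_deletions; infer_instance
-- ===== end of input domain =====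

-- B replaces A's four-branch accumulator-list loop by an index-only walk plus a prefix slice (objective: simpler).

-- shared exact port of Python's str.rstrip('-'): drop trailing '-' characters
def pvRstripDash (l : List Char) : List Char := (l.reverse.dropWhile (· == '-')).reverse

-- ===== PORT A =====
-- A's while-loop; ref_index advances on every iteration, so we recurse on the remaining ref chars
def alignLoopA (acc : List Char) (trans : List Char) (ref : List Char) : List Char :=
  match ref, trans with
  | [], _ => acc
  | _, [] => acc
  | rc :: rs, tc :: ts =>
    if tc = rc then alignLoopA (acc ++ [tc]) ts rs
    else if tc = '-' then alignLoopA (acc ++ ['-']) ts rs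
    else if rc = '-' then alignLoopA acc (tc :: ts) rs
    else alignLoopA (acc ++ [tc]) ts rs

def align_and_handle_deletions (translated_seq : String) (ref_seq : String) : String :=
  String.ofList (pvRstripDash (alignLoopA [] translated_seq.toList ref_seq.toList))

-- ===== PORT B =====
-- B's for-loop over ref_seq maintaining only the index i into translated_seq
def alignLoopB (t : List Char) (ref : List Char) (i : Nat) : Nat :=
  match ref with
  | [] => i
  | c :: rs =>
    if t.length ≤ i then i
    else if c = '-' ∧ t.getD i ' ' ≠ '-' then alignLoopB t rs i
    else alignLoopB t rs (i + 1)

def align_and_handle_deletions_alt (translated_seq : String) (ref_seq : String) : String :=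
  String.ofList (pvRstripDash (translated_seq.toList.take (alignLoopB translated_seq.toList ref_seq.toList 0)))

-- ===== PRECONDITION & SPEC =====
def Spec_align_and_handle_deletions (translated_seq : String) (ref_seq : String) (out : String) : Prop := out = align_and_handle_deletions_alt translated_seq ref_seq
instance (translated_seq : String) (ref_seq : String) (out : String) : Decidable (Spec_align_and_handle_deletions translated_seq ref_seq out) := by unfold Spec_align_and_handle_deletions; infer_instance

-- ===== CLAIM (what is proved, stated in full; the proofs are below) =====
def Claim_equal_align_and_handle_deletions : Prop := ∀ (translated_seq : String) (ref_seq : String), Dom_align_and_handle_deletions translated_seq ref_seq → Spec_align_and_handle_deletions translated_seq ref_seq (align_and_handle_deletions translated_seq ref_seq)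

-- ===== LEMMAS AND PROOFS =====

-- the matched prefix of trans, as a bare list (common middle form of both loops)
def alignMid (trans : List Char) (ref : List Char) : List Char :=
  match ref, trans with
  | [], _ => []
  | _, [] => []
  | rc :: rs, tc :: ts =>
    if rc = '-' ∧ tc ≠ '-' then alignMid (tc :: ts) rs
    else tc :: alignMid ts rs

theorem alignLoopA_eq_mid (acc trans ref : List Char) :
    alignLoopA acc trans ref = acc ++ alignMid trans ref := by
  induction ref generalizing acc trans with
  | nil => cases trans <;> simp [alignLoopA, alignMid]
  | cons rc rs ih =>
    cases trans with
    | nil => simp [alignLoopA, alignMid]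
    | cons tc ts =>
      by_cases h1 : tc = rc
      · subst h1
        by_cases h2 : tc = '-'
        · simp [alignLoopA, alignMid, h2, ih]
        · simp [alignLoopA, alignMid, h2, ih]
      · by_cases h2 : tc = '-'
        · subst h2
          simp [alignLoopA, alignMid, h1, ih]
        · by_cases h3 : rc = '-'
          · simp [alignLoopA, alignMid, h2, h3, ih]
          · simp [alignLoopA, alignMid, h1, h2, h3, ih]

theorem alignLoopB_eq_mid (t ref : List Char) (i : Nat) :
    alignLoopB t ref i = i + (alignMid (t.drop i) ref).length := by
  induction ref generalizing i with
  | nil => cases h : t.drop i <;> simp [alignLoopB, alignMid]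
  | cons c rs ih =>
    by_cases hlen : t.length ≤ i
    · have hd : t.drop i = [] := List.drop_eq_nil_of_le hlen
      simp [alignLoopB, alignMid, hlen, hd]
    · rw [Nat.not_le] at hlen
      have hd : t.drop i = t[i] :: t.drop (i + 1) := List.drop_eq_getElem_cons hlen
      have hget : t.getD i ' ' = t[i] := List.getD_eq_getElem t ' ' hlen
      by_cases hc : c = '-' ∧ t.getD i ' ' ≠ '-'
      · have : alignMid (t.drop i) (c :: rs) = alignMid (t.drop i) rs := by
          rw [hd]
          simp only [alignMid]
          rw [if_pos ⟨hc.1, by rw [← hget]; exact hc.2⟩]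
        simp only [alignLoopB, if_neg (by omega : ¬ t.length ≤ i), if_pos hc, this, ih]
      · have : alignMid (t.drop i) (c :: rs) = t[i] :: alignMid (t.drop (i + 1)) rs := by
          rw [hd]
          simp only [alignMid]
          rw [if_neg]
          intro ⟨h1, h2⟩
          exact hc ⟨h1, by rw [hget]; exact h2⟩
        simp only [alignLoopB, if_neg (by omega : ¬ t.length ≤ i), if_neg hc, this, ih]
        simp; omega

theorem alignMid_isPrefix (trans ref : List Char) :
    trans.take (alignMid trans ref).length = alignMid trans ref := by
  induction ref generalizing trans with
  | nil => cases trans <;> simp [alignMid]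
  | cons rc rs ih =>
    cases trans with
    | nil => simp [alignMid]
    | cons tc ts =>
      simp only [alignMid]
      split_ifs with h
      · exact ih (tc :: ts)
      · simp [ih ts]

-- ===== VERDICT (by name: the statement is the Claim_ definition above) =====
theorem align_and_handle_deletions_spec : Claim_equal_align_and_handle_deletions := by
  intro t r _
  show _ = _
  unfold align_and_handle_deletions align_and_handle_deletions_alt
  rw [alignLoopB_eq_mid, alignLoopA_eq_mid]
  simp [alignMid_isPrefix]
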